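-- pv_equiv track=rewrite | github.com/Evgesha2022/test_QE | test.py | optimize_lenses_pairs
-- ===== SOURCE A (Python) =====
-- def optimize_lenses_pairs(cyclops_prescriptions):
--     # Step 1: Sort the prescriptions in ascending order
--     sorted_prescriptions = sorted(cyclops_prescriptions)
--
--     # Step 2: Initialize a variable to count the minimum pairs
--     min_pairs = 0
--
--     # Step 3: Greedy approach to find the minimum pairs
--     n = len(sorted_prescriptions)
--     i = 0
--     while i < n:
--         # Find the maximum valid power for the current cyclops
--         max_valid_power = sorted_prescriptions[i] + 1
--
--         # Look for the last cyclops that can share the same lens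
--         j = i
--         while j < n and sorted_prescriptions[j] <= max_valid_power:
--             j += 1
--
--         # Increase the count of minimum pairs
--         min_pairs += 1
--
--         # Move to the next group of cyclops with different prescriptions
--         i = j
--
--     return min_pairs
--
-- cyclops_prescriptions = [1, -1, 2, 3, -3]
--
-- min_pairs = optimize_lenses_pairs(cyclops_prescriptions)
-- ===== SOURCE B (Python) =====
-- def optimize_lenses_pairs(cyclops_prescriptions):
--     # Different algorithm: no sorting. Treat the prescriptions as a set and
--     # decompose it into maximal runs of consecutive integers; a greedy +1-span
--     # grouping uses exactly ceil(L/2) = (L+1)//2 groups per run of length L.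
--     s = set(cyclops_prescriptions)
--     total = 0
--     for v in s:
--         if v - 1 not in s:  # v starts a maximal consecutive run
--             length = 1
--             while v + length in s:
--                 length += 1
--             total += (length + 1) // 2
--     return total
-- ===== Notes on version B (the rewrite author's own statement) =====
-- stated objective: alternative
-- what changed: Replaced sort-then-greedy-scan by a set-based algorithm: build a hash set, find each maximal run of consecutive values (v with v-1 not in the set), and add ceil(runlength/2) groups per run; no sorting at all.
import Mathlib
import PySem

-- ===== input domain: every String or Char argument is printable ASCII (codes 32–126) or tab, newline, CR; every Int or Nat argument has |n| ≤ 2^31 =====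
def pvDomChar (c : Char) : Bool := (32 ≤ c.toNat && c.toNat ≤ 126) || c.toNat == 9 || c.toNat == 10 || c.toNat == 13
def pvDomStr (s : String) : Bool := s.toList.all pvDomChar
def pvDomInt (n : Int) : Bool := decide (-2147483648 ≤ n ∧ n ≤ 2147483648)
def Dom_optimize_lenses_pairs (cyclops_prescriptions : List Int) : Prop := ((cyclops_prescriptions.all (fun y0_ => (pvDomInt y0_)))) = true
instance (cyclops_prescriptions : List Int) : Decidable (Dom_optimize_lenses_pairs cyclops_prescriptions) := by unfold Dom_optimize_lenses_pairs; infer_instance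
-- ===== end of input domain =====

-- B abandons sort-then-greedy-scan: it treats the input as a set, finds each maximal run of
-- consecutive values (v with v-1 absent), and adds (runlength+1)//2 groups per run (alternative).


-- ===== PORT A =====
-- inner while: advance j while sorted[j] <= max_valid_power, i.e. skip that prefix
def pvSkipLe (bound : Int) : List Int → List Int
  | [] => []
  | x :: t => if x ≤ bound then pvSkipLe bound t else x :: t

theorem pvSkipLe_length_le (bound : Int) (l : List Int) : (pvSkipLe bound l).length ≤ l.length := by
  induction l with
  | nil => simp [pvSkipLe]
  | cons x t ih =>
    simp only [pvSkipLe]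
    split
    · exact Nat.le_succ_of_le ih
    · exact Nat.le_refl _

-- outer while over the remaining suffix of the sorted list: one group per iteration
def pvOuterA : List Int → Int
  | [] => 0
  | x :: t => 1 + pvOuterA (pvSkipLe (x + 1) t)
termination_by l => l.length
decreasing_by
  exact Nat.lt_succ_of_le (pvSkipLe_length_le _ _)

def optimize_lenses_pairs (cyclops_prescriptions : List Int) : Int :=
  pvOuterA (PySem.List.sorted cyclops_prescriptions (fun x => x) false)

-- ===== PORT B =====
-- the 'while v + length in s: length += 1' loop; fuel s.length + 1 is enough (run ⊆ s, s distinct)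
def pvRunLen (s : List Int) (v : Int) : Nat → Int → Int
  | 0, len => len
  | fuel + 1, len => if (v + len) ∈ s then pvRunLen s v fuel (len + 1) else len

def optimize_lenses_pairs_alt (cyclops_prescriptions : List Int) : Int :=
  let s := PySem.Set.ofList cyclops_prescriptions
  s.foldl (fun total v =>
    if (v - 1) ∈ s then total
    else total + PySem.Int.floordiv (pvRunLen s v (s.length + 1) 1 + 1) 2) 0

-- ===== PRECONDITION & SPEC =====
def Spec_optimize_lenses_pairs (cyclops_prescriptions : List Int) (out : Int) : Prop := out = optimize_lenses_pairs_alt cyclops_prescriptions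
instance (cyclops_prescriptions : List Int) (out : Int) : Decidable (Spec_optimize_lenses_pairs cyclops_prescriptions out) := by unfold Spec_optimize_lenses_pairs; infer_instance

-- ===== CLAIM (what is proved, stated in full; the proofs are below) =====
def Claim_equal_optimize_lenses_pairs : Prop := ∀ (cyclops_prescriptions : List Int), Dom_optimize_lenses_pairs cyclops_prescriptions → Spec_optimize_lenses_pairs cyclops_prescriptions (optimize_lenses_pairs cyclops_prescriptions)

-- ===== LEMMAS AND PROOFS =====

theorem pvOuterA_nil : pvOuterA [] = 0 := by rw [pvOuterA]

theorem pvOuterA_cons (x : Int) (t : List Int) :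
    pvOuterA (x :: t) = 1 + pvOuterA (pvSkipLe (x + 1) t) := by rw [pvOuterA]

-- one element's contribution in B's pass over the set s
def pvContrib (s : List Int) (v : Int) : Int :=
  if (v - 1) ∈ s then 0 else PySem.Int.floordiv (pvRunLen s v (s.length + 1) 1 + 1) 2

-- B's fold is the sum of the contributions
theorem foldl_contrib (s l : List Int) (init : Int) :
    l.foldl (fun total v =>
      if (v - 1) ∈ s then total
      else total + PySem.Int.floordiv (pvRunLen s v (s.length + 1) 1 + 1) 2) init
    = init + (l.map (pvContrib s)).sum := by
  have h : (fun (total : Int) (v : Int) =>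
      if (v - 1) ∈ s then total
      else total + PySem.Int.floordiv (pvRunLen s v (s.length + 1) 1 + 1) 2)
      = fun total v => total + pvContrib s v := by
    funext total v
    unfold pvContrib
    split <;> simp
  rw [h]
  exact PySem.List.foldl_add _ _ _

-- the fuelled while-loop returns the least break point when given enough fuel
theorem pvRunLen_spec (s : List Int) (v : Int) :
    ∀ (fuel : Nat) (k L : Int), 1 ≤ k → k ≤ L →
      (∀ i : Int, k ≤ i → i < L → (v + i) ∈ s) → (v + L) ∉ s → L - k < (fuel : Int) →
      pvRunLen s v fuel k = L := by
  intro fuel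
  induction fuel with
  | zero => intro k L h1 h2 _ _ h5; simp at h5; omega
  | succ f ih =>
    intro k L h1 h2 hmem hout h5
    by_cases hk : k = L
    · subst hk
      simp [pvRunLen, hout]
    · have hkL : k < L := lt_of_le_of_ne h2 hk
      have : (v + k) ∈ s := hmem k le_rfl hkL
      simp only [pvRunLen, this, if_true]
      exact ih (k + 1) L (by omega) (by omega) (fun i hi1 hi2 => hmem i (by omega) hi2) hout
        (by push_cast at h5 ⊢; omega)

-- pvRunLen only looks at membership
theorem pvRunLen_congr (s s' : List Int) (h : ∀ z : Int, z ∈ s ↔ z ∈ s') (v : Int) :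
    ∀ (fuel : Nat) (k : Int), pvRunLen s v fuel k = pvRunLen s' v fuel k := by
  intro fuel
  induction fuel with
  | zero => intro k; rfl
  | succ f ih =>
    intro k
    simp only [pvRunLen, h]
    split <;> simp [ih]

theorem pvContrib_congr (s s' : List Int) (hm : ∀ z : Int, z ∈ s ↔ z ∈ s')
    (hl : s.length = s'.length) (v : Int) : pvContrib s v = pvContrib s' v := by
  unfold pvContrib
  rw [hl, pvRunLen_congr s s' hm]
  simp only [hm]

-- pvSkipLe on a sorted list is a filter
theorem pvSkipLe_eq_filter (l : List Int) (hs : l.Pairwise (· ≤ ·)) (b : Int) :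
    pvSkipLe b l = l.filter (fun z => decide (b < z)) := by
  induction l with
  | nil => rfl
  | cons x t ih =>
    rcases List.pairwise_cons.mp hs with ⟨hx, ht⟩
    by_cases hxb : x ≤ b
    · have : ¬ b < x := not_lt.mpr hxb
      simp only [pvSkipLe, hxb, if_true, List.filter_cons, this, decide_false]
      simpa using ih ht
    · have hbx : b < x := lt_of_not_ge hxb
      have hall : ∀ z ∈ x :: t, b < z := by
        intro z hz
        rcases List.mem_cons.mp hz with rfl | h
        · exact hbx
        · exact lt_of_lt_of_le hbx (hx z h)
      rw [List.filter_eq_self.mpr (fun z hz => decide_eq_true (hall z hz))]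
      simp [pvSkipLe, hxb]

-- greedy count depends only on the membership set, for sorted lists
theorem pvOuterA_congr : ∀ (n : Nat) (l d : List Int), l.length ≤ n →
    l.Pairwise (· ≤ ·) → d.Pairwise (· ≤ ·) → (∀ z : Int, z ∈ l ↔ z ∈ d) →
    pvOuterA l = pvOuterA d := by
  intro n
  induction n with
  | zero =>
    intro l d hn _ _ hm
    have hl : l = [] := List.length_eq_zero_iff.mp (Nat.le_zero.mp hn)
    subst hl
    cases d with
    | nil => rfl
    | cons y s => exact absurd ((hm y).mpr (List.mem_cons_self)) (List.not_mem_nil)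
  | succ n ih =>
    intro l d hn hl hd hm
    cases l with
    | nil =>
      cases d with
      | nil => rfl
      | cons y s => exact absurd ((hm y).mpr (List.mem_cons_self)) (List.not_mem_nil)
    | cons x t =>
      cases d with
      | nil => exact absurd ((hm x).mp (List.mem_cons_self)) (List.not_mem_nil)
      | cons y s =>
        rcases List.pairwise_cons.mp hl with ⟨hxt, ht⟩
        rcases List.pairwise_cons.mp hd with ⟨hys, hs⟩
        have hxy : x = y := by
          have h1 : x ≤ y := by
            rcases List.mem_cons.mp ((hm y).mpr List.mem_cons_self) with h | h
            · omega
            · exact hxt y h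
          have h2 : y ≤ x := by
            rcases List.mem_cons.mp ((hm x).mp List.mem_cons_self) with h | h
            · omega
            · exact hys x h
          omega
        subst hxy
        rw [pvOuterA_cons, pvOuterA_cons]
        rw [pvSkipLe_eq_filter t ht, pvSkipLe_eq_filter s hs]
        refine congrArg (1 + ·) (ih _ _ ?_ (List.Pairwise.filter _ ht) (List.Pairwise.filter _ hs) ?_)
        · have := List.length_filter_le (fun z => decide ((x:Int) + 1 < z)) t
          simp at hn
          omega
        · intro z
          simp only [List.mem_filter, decide_eq_true_eq]
          constructor
          · rintro ⟨hz, hlt⟩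
            refine ⟨?_, hlt⟩
            rcases List.mem_cons.mp ((hm z).mp (List.mem_cons_of_mem _ hz)) with h | h
            · omega
            · exact h
          · rintro ⟨hz, hlt⟩
            refine ⟨?_, hlt⟩
            rcases List.mem_cons.mp ((hm z).mpr (List.mem_cons_of_mem _ hz)) with h | h
            · omega
            · exact h

-- a strictly sorted list decomposes into its first maximal consecutive run and a remote rest
theorem pvDecomp : ∀ (t : List Int) (x : Int), (x :: t).Pairwise (· < ·) →
    ∃ (L : Nat) (rest : List Int), 1 ≤ L ∧
      x :: t = PySem.List.pyRange x (x + L) 1 ++ rest ∧ (∀ z ∈ rest, x + L < z) := by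
  intro t
  induction t with
  | nil =>
    intro x _
    exact ⟨1, [], le_rfl, by simp [PySem.List.pyRange_one_singleton], by simp⟩
  | cons y t' ih =>
    intro x hp
    rcases List.pairwise_cons.mp hp with ⟨hx, hyt⟩
    by_cases hy : y = x + 1
    · subst hy
      rcases ih (x + 1) hyt with ⟨L', rest, hL', heq, hrest⟩
      refine ⟨L' + 1, rest, by omega, ?_, ?_⟩
      · rw [PySem.List.pyRange_one_cons (by omega)]
        push_cast
        rw [show x + ((L' : Int) + 1) = (x + 1) + L' by ring]
        simpa using heq
      · intro z hz
        have := hrest z hz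
        push_cast
        omega
    · have hxy : x < y := hx y List.mem_cons_self
      have hy2 : x + 1 < y := by omega
      refine ⟨1, y :: t', le_rfl, by simp [PySem.List.pyRange_one_singleton], ?_⟩
      intro z hz
      rcases List.mem_cons.mp hz with h | h
      · omega
      · have := (List.pairwise_cons.mp hyt).1 z h
        push_cast
        omega

-- greedy on (run of length L) ++ (rest beyond x+L) costs ceil(L/2) = (L+1)//2 plus greedy on rest
theorem pvGreedyRun : ∀ (L : Nat) (x : Int) (rest : List Int), 1 ≤ L →
    (PySem.List.pyRange x (x + L) 1 ++ rest).Pairwise (· < ·) →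
    (∀ z ∈ rest, x + L < z) →
    pvOuterA (PySem.List.pyRange x (x + L) 1 ++ rest)
      = PySem.Int.floordiv ((L : Int) + 1) 2 + pvOuterA rest := by
  intro L
  induction L using Nat.strong_induction_on with
  | _ L ih =>
    intro x rest hL hp hrest
    have hcons : PySem.List.pyRange x (x + (L:Int)) 1 = x :: PySem.List.pyRange (x + 1) (x + L) 1 :=
      PySem.List.pyRange_one_cons (by omega)
    rw [hcons]
    have hp' := hp
    rw [hcons, List.cons_append] at hp'
    rcases List.pairwise_cons.mp hp' with ⟨_, htail⟩
    rw [List.cons_append, pvOuterA_cons]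
    rw [pvSkipLe_eq_filter _ (htail.imp (fun h => le_of_lt h))]
    rw [List.filter_append]
    have hfrest : rest.filter (fun z => decide (x + 1 < z)) = rest := by
      rw [List.filter_eq_self]
      intro z hz
      exact decide_eq_true (by have := hrest z hz; omega)
    rw [hfrest]
    have hfrun : (PySem.List.pyRange (x+1) (x + L) 1).filter (fun z => decide (x + 1 < z))
        = PySem.List.pyRange (x+2) (x + L) 1 := by
      by_cases h2 : 2 ≤ L
      · rw [PySem.List.pyRange_one_cons (show (x:Int) + 1 < x + L by omega),
            List.filter_cons]
        rw [if_neg (by simp)]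
        rw [show (x:Int) + 1 + 1 = x + 2 from by ring]
        rw [List.filter_eq_self]
        intro z hz
        have := PySem.List.mem_pyRange_one.mp hz
        exact decide_eq_true (by omega)
      · have h1 : L = 1 := by omega
        subst h1
        rw [PySem.List.pyRange_one_eq_nil (by omega),
            PySem.List.pyRange_one_eq_nil (by omega)]
        rfl
    rw [hfrun]
    by_cases h3 : 3 ≤ L
    · have hrec := ih (L - 2) (by omega) (x + 2) rest (by omega) ?_ ?_
      · rw [show ((x:Int) + 2) + ((L - 2 : Nat) : Int) = x + L by omega] at hrec
        rw [hrec]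
        rw [PySem.Int.floordiv_eq_ediv_of_pos (by omega), PySem.Int.floordiv_eq_ediv_of_pos (by omega)]
        omega
      · rw [show ((x:Int) + 2) + ((L - 2 : Nat) : Int) = x + L by omega]
        have hsub : (PySem.List.pyRange (x + 2) (x + (L:Int)) 1).Sublist
            (PySem.List.pyRange (x + 1) (x + (L:Int)) 1) := by
          rw [PySem.List.pyRange_one_cons (show (x:Int) + 1 < x + (L:Int) by omega)]
          rw [show (x:Int) + 1 + 1 = x + 2 from by ring]
          exact List.sublist_cons_self _ _
        exact List.Pairwise.sublist (List.Sublist.append_right hsub rest) htail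
      · intro z hz
        have := hrest z hz
        rw [show ((x:Int) + 2) + ((L - 2 : Nat) : Int) = x + L by omega]
        exact this
    · have hnil : PySem.List.pyRange (x+2) (x + (L:Int)) 1 = [] :=
        PySem.List.pyRange_one_eq_nil (by omega)
      rw [hnil, List.nil_append]
      have : PySem.Int.floordiv ((L:Int) + 1) 2 = 1 := by
        rw [PySem.Int.floordiv_eq_ediv_of_pos (by omega)]
        interval_cases L <;> rfl
      omega

-- main invariant: for a strictly sorted tail d of the full set D (earlier elements all < z - 1),
-- greedy on d equals the sum over d of B's contributions computed against D
theorem pvMain : ∀ (n : Nat) (d pre : List Int), d.length ≤ n →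
    (pre ++ d).Pairwise (· < ·) → (∀ y ∈ pre, ∀ z ∈ d, y + 1 < z) →
    pvOuterA d = (d.map (pvContrib (pre ++ d))).sum := by
  intro n
  induction n with
  | zero =>
    intro d pre hn _ _
    have : d = [] := List.length_eq_zero_iff.mp (Nat.le_zero.mp hn)
    subst this
    simp [pvOuterA_nil]
  | succ n ih =>
    intro d pre hn hp hpre
    cases d with
    | nil => simp [pvOuterA_nil]
    | cons x t =>
      have hpd : (x :: t).Pairwise (· < ·) := (List.pairwise_append.mp hp).2.1
      rcases pvDecomp t x hpd with ⟨L, rest, hL, heq, hrest⟩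
      set D := pre ++ (x :: t) with hD
      -- membership shape of D
      have hDeq : D = pre ++ (PySem.List.pyRange x (x + L) 1 ++ rest) := by rw [hD, heq]
      have hxmem : ∀ z : Int, z ∈ D ↔ z ∈ pre ∨ z ∈ x :: t := by
        intro z; simp [hD]
      -- (x - 1) ∉ D
      have hx1 : (x - 1) ∉ D := by
        intro hmem
        rcases (hxmem _).mp hmem with h | h
        · have := hpre _ h x List.mem_cons_self
          omega
        · rcases List.mem_cons.mp h with h' | h'
          · omega
          · have := (List.pairwise_cons.mp hpd).1 _ h'
            omega
      -- x + L ∉ D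
      have hxL : (x + (L:Int)) ∉ D := by
        intro hmem
        rw [hDeq] at hmem
        rcases List.mem_append.mp hmem with h | h
        · have := hpre _ h x List.mem_cons_self
          omega
        · rcases List.mem_append.mp h with h' | h'
          · have := PySem.List.mem_pyRange_one.mp h'
            omega
          · have := hrest _ h'
            omega
      -- run length of x in D is L
      have hlen : pvRunLen D x (D.length + 1) 1 = (L : Int) := by
        apply pvRunLen_spec D x (D.length + 1) 1 L (le_refl 1) (by exact_mod_cast hL)
        · intro i h1 h2
          rw [hDeq]
          refine List.mem_append.mpr (Or.inr (List.mem_append.mpr (Or.inl ?_)))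
          exact PySem.List.mem_pyRange_one.mpr ⟨by omega, by omega⟩
        · exact hxL
        · have hLlen : L ≤ D.length := by
            have : (PySem.List.pyRange x (x + (L:Int)) 1).length = L := by
              rw [PySem.List.length_pyRange_one]
              omega
            rw [hDeq]
            simp [this]
            omega
          push_cast
          omega
      have hcx : pvContrib D x = PySem.Int.floordiv ((L:Int) + 1) 2 := by
        unfold pvContrib
        rw [if_neg hx1, hlen]
      -- contributions of the rest of the run are zero
      have hzero : ∀ v ∈ PySem.List.pyRange (x + 1) (x + (L:Int)) 1, pvContrib D v = 0 := by
        intro v hv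
        have hv' := PySem.List.mem_pyRange_one.mp hv
        have hmem : (v - 1) ∈ D := by
          rw [hDeq]
          refine List.mem_append.mpr (Or.inr (List.mem_append.mpr (Or.inl ?_)))
          exact PySem.List.mem_pyRange_one.mpr ⟨by omega, by omega⟩
        unfold pvContrib
        rw [if_pos hmem]
      -- sum over the run
      have hruncons : PySem.List.pyRange x (x + (L:Int)) 1
          = x :: PySem.List.pyRange (x + 1) (x + (L:Int)) 1 :=
        PySem.List.pyRange_one_cons (by omega)
      -- rewrite d as run ++ rest and split
      rw [heq]
      rw [List.map_append, List.sum_append]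
      have hsumrun : ((PySem.List.pyRange x (x + (L:Int)) 1).map (pvContrib D)).sum
          = PySem.Int.floordiv ((L:Int) + 1) 2 := by
        rw [hruncons]
        simp only [List.map_cons, List.sum_cons]
        rw [hcx, List.sum_eq_zero]
        · ring
        · intro a ha
          rcases List.mem_map.mp ha with ⟨v, hv, rfl⟩
          exact hzero v hv
      -- IH on rest with pre' = pre ++ run
      have hih : pvOuterA rest = (rest.map (pvContrib D)).sum := by
        have hassoc : (pre ++ PySem.List.pyRange x (x + (L:Int)) 1) ++ rest = D := by
          rw [hDeq, List.append_assoc]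
        have := ih rest (pre ++ PySem.List.pyRange x (x + (L:Int)) 1) ?_ ?_ ?_
        · rw [hassoc] at this
          exact this
        · have hlt : t.length ≤ n := by simpa using hn
          have : rest.length ≤ t.length := by
            have := congrArg List.length heq
            simp [PySem.List.length_pyRange_one] at this
            omega
          omega
        · rw [hassoc]
          exact hp
        · intro y hy z hz
          rcases List.mem_append.mp hy with h | h
          · exact hpre y h z (by rw [heq]; exact List.mem_append.mpr (Or.inr hz))
          · have h1 := PySem.List.mem_pyRange_one.mp h
            have h2 := hrest z hz
            omega
      rw [hsumrun, ← hih]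
      exact pvGreedyRun L x rest hL (by rw [← heq]; exact hpd) hrest

-- ===== VERDICT (by name: the statement is the Claim_ definition above) =====
theorem optimize_lenses_pairs_spec : Claim_equal_optimize_lenses_pairs := by
  intro xs _
  show pvOuterA (PySem.List.sorted xs (fun x => x) false) = optimize_lenses_pairs_alt xs
  have halt : optimize_lenses_pairs_alt xs
      = ((PySem.Set.ofList xs).map (pvContrib (PySem.Set.ofList xs))).sum := by
    have hz : optimize_lenses_pairs_alt xs
        = (PySem.Set.ofList xs).foldl (fun total v =>
            if (v - 1) ∈ PySem.Set.ofList xs then total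
            else total + PySem.Int.floordiv
              (pvRunLen (PySem.Set.ofList xs) v ((PySem.Set.ofList xs).length + 1) 1 + 1) 2) 0 := rfl
    rw [hz, foldl_contrib, zero_add]
  rw [halt]
  have hperm : (PySem.List.sorted (PySem.Set.ofList xs) (fun x => x) false).Perm
      (PySem.Set.ofList xs) := PySem.List.sorted_perm _ _ _
  have hdlt : (PySem.List.sorted (PySem.Set.ofList xs) (fun x => x) false).Pairwise (· < ·) :=
    PySem.List.sorted_ofList_pairwise_lt xs
  have hsum : ((PySem.Set.ofList xs).map (pvContrib (PySem.Set.ofList xs))).sum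
      = ((PySem.List.sorted (PySem.Set.ofList xs) (fun x => x) false).map
          (pvContrib (PySem.List.sorted (PySem.Set.ofList xs) (fun x => x) false))).sum := by
    have hc : ∀ v : Int, pvContrib (PySem.Set.ofList xs) v
        = pvContrib (PySem.List.sorted (PySem.Set.ofList xs) (fun x => x) false) v := fun v =>
      pvContrib_congr _ _ (fun z => (hperm.mem_iff).symm) hperm.length_eq.symm v
    calc ((PySem.Set.ofList xs).map (pvContrib (PySem.Set.ofList xs))).sum
        = ((PySem.Set.ofList xs).map
            (pvContrib (PySem.List.sorted (PySem.Set.ofList xs) (fun x => x) false))).sum :=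
          congrArg List.sum (List.map_congr_left (fun v _ => hc v))
      _ = _ := ((hperm.map _).sum_eq).symm
  rw [hsum]
  have hcongr : pvOuterA (PySem.List.sorted xs (fun x => x) false)
      = pvOuterA (PySem.List.sorted (PySem.Set.ofList xs) (fun x => x) false) := by
    apply pvOuterA_congr (PySem.List.sorted xs (fun x => x) false).length _ _ le_rfl
    · exact PySem.List.sorted_pairwise xs (fun x => x)
    · exact hdlt.imp (fun h => le_of_lt h)
    · intro z
      rw [PySem.List.mem_sorted, PySem.List.mem_sorted, PySem.Set.mem_ofList]
  rw [hcongr]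
  have := pvMain (PySem.List.sorted (PySem.Set.ofList xs) (fun x => x) false).length
    (PySem.List.sorted (PySem.Set.ofList xs) (fun x => x) false) [] le_rfl
    (by rw [List.nil_append]; exact hdlt) (by intro y hy; cases hy)
  rw [List.nil_append] at this
  exact this
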